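-- pv_equiv track=rewrite | github.com/stanfordnmbl/opencap-core | utils.py | get_entry_with_largest_number
-- ===== SOURCE A (Python) =====
-- def get_entry_with_largest_number(trialList):
--     max_entry = None
--     max_number = float('-inf')
--
--     for entry in trialList:
--         # Extract the number from the string
--         try:
--             number = int(entry.split('_')[-1])
--             if number > max_number:
--                 max_number = number
--                 max_entry = entry
--         except ValueError:
--             continue
--
--     return max_entry
-- ===== SOURCE B (Python) =====
-- def get_entry_with_largest_number(trialList):
--     # Phase 1: parse every entry's trailing number into a candidate list.
--     candidates = []
--     for entry in trialList:
--         try: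
--             candidates.append((int(entry.split('_')[-1]), entry))
--         except ValueError:
--             continue
--     # Phase 2: pick the first candidate with the largest number.
--     if not candidates:
--         return None
--     return max(candidates, key=lambda c: c[0])[1]
-- ===== Notes on version B (the rewrite author's own statement) =====
-- stated objective: alternative
-- what changed: B separates parsing from selection: one pass builds a list of (number, entry) candidates, then Python's max with a number key (first extremal) picks the answer, instead of threading a running max_number/max_entry pair through the loop.
import Mathlib
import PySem

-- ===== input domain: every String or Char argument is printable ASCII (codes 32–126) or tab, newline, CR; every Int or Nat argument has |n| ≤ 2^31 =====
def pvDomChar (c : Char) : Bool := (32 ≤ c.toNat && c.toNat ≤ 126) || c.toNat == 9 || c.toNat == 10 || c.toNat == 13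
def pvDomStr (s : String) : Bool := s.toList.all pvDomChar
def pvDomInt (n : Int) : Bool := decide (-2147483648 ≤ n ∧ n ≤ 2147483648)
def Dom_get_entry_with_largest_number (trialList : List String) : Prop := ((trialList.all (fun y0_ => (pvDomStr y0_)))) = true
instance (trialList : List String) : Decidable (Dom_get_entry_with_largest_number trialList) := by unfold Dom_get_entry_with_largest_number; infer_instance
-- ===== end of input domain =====

-- B separates parsing from selection: build the (number, entry) candidate list in one pass,
-- then take the first maximum by number — instead of A's running max threaded through the loop.


-- shared sub-expression of both sources: int(entry.split('_')[-1]), none = ValueError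
def parseTrailing (entry : String) : Option Int :=
  match PySem.Str.split? entry "_" with
  | none => none
  | some parts =>
    match PySem.List.pyGet? parts (-1) with
    | none => none
    | some last => PySem.Int.ofStr? last

-- ===== PORT A =====
-- running (max_entry, max_number); max_number = none models float('-inf') (any int exceeds it)
def get_entry_with_largest_number (trialList : List String) : Option String :=
  (trialList.foldl
    (fun (st : Option String × Option Int) entry =>
      match parseTrailing entry with
      | none => st
      | some number =>
        match st.2 with
        | none => (some entry, some number)
        | some m => if m < number then (some entry, some number) else st)
    (none, none)).1

-- ===== PORT B =====
def get_entry_with_largest_number_alt (trialList : List String) : Option String :=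
  let candidates : List (Int × String) :=
    trialList.foldl
      (fun acc entry =>
        match parseTrailing entry with
        | none => acc
        | some n => acc ++ [(n, entry)])
      []
  match PySem.List.max? candidates (fun c => c.1) with
  | none => none
  | some c => some c.2

-- ===== PRECONDITION & SPEC =====
def Spec_get_entry_with_largest_number (trialList : List String) (out : Option String) : Prop := out = get_entry_with_largest_number_alt trialList
instance (trialList : List String) (out : Option String) : Decidable (Spec_get_entry_with_largest_number trialList out) := by unfold Spec_get_entry_with_largest_number; infer_instance

-- ===== CLAIM (what is proved, stated in full; the proofs are below) =====
def Claim_equal_get_entry_with_largest_number : Prop := ∀ (trialList : List String), Dom_get_entry_with_largest_number trialList → Spec_get_entry_with_largest_number trialList (get_entry_with_largest_number trialList)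

-- ===== LEMMAS AND PROOFS =====

-- A's state as a function of the candidate list's first maximum
def pvPack (s : Option (Int × String)) : Option String × Option Int :=
  match s with
  | none => (none, none)
  | some (n, e) => (some e, some n)

-- Python max over a list extended by one element: first-extremal step
theorem pvMax?_snoc (c : List (Int × String)) (x : Int × String) :
    PySem.List.max? (c ++ [x]) (fun c => c.1)
    = (match PySem.List.max? c (fun c => c.1) with
       | none => some x
       | some m => if m.1 < x.1 then some x else some m) := by
  cases hq : PySem.List.max? c (fun c => c.1) with
  | none =>
    simp only [PySem.List.max?] at hq ⊢
    rw [List.foldl_append, hq]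
    rfl
  | some m =>
    simp only [PySem.List.max?] at hq ⊢
    rw [List.foldl_append, hq]
    rfl

theorem pvLoop_eq (l : List String) : ∀ (c : List (Int × String)),
    l.foldl
      (fun (st : Option String × Option Int) entry =>
        match parseTrailing entry with
        | none => st
        | some number =>
          match st.2 with
          | none => (some entry, some number)
          | some m => if m < number then (some entry, some number) else st)
      (pvPack (PySem.List.max? c (fun c => c.1)))
    = pvPack (PySem.List.max?
        (l.foldl
          (fun acc entry =>
            match parseTrailing entry with
            | none => acc
            | some n => acc ++ [(n, entry)])
          c)
        (fun c => c.1)) := by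
  induction l with
  | nil => intro c; rfl
  | cons e t ih =>
    intro c
    simp only [List.foldl_cons]
    cases hp : parseTrailing e with
    | none => simpa [hp] using ih c
    | some n =>
      have hstep :
          (match (pvPack (PySem.List.max? c (fun c => c.1))).2 with
            | none => ((some e : Option String), (some n : Option Int))
            | some m => if m < n then (some e, some n)
                        else pvPack (PySem.List.max? c (fun c => c.1)))
          = pvPack (PySem.List.max? (c ++ [(n, e)]) (fun c => c.1)) := by
        rw [pvMax?_snoc]
        cases hq : PySem.List.max? c (fun c => c.1) with
        | none => rfl
        | some m =>
          obtain ⟨mn, me⟩ := m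
          by_cases h : mn < n <;> simp [pvPack, h]
      rw [hstep]
      simpa using ih (c ++ [(n, e)])

-- ===== VERDICT (by name: the statement is the Claim_ definition above) =====
theorem get_entry_with_largest_number_spec : Claim_equal_get_entry_with_largest_number := by
  intro trialList _
  unfold Spec_get_entry_with_largest_number get_entry_with_largest_number get_entry_with_largest_number_alt
  have h := pvLoop_eq trialList []
  have h0 : ((none, none) : Option String × Option Int)
      = pvPack (PySem.List.max? ([] : List (Int × String)) (fun c => c.1)) := rfl
  rw [h0, h]
  cases hq : PySem.List.max?
      (trialList.foldl
        (fun acc entry =>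
          match parseTrailing entry with
          | none => acc
          | some n => acc ++ [(n, entry)]) [])
      (fun c => c.1) with
  | none => simp [hq, pvPack]
  | some m => obtain ⟨mn, me⟩ := m; simp [hq, pvPack]
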